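-- pv_equiv track=rewrite | github.com/NicoGGG/adventofcode | 2023/1/read_calibration.py | where_is_next_digit
-- ===== SOURCE A (Python) =====
-- digits = [
--     "one",
--     "two",
--     "three",
--     "four",
--     "five",
--     "six",
--     "seven",
--     "eight",
--     "nine",
--     "1",
--     "2",
--     "3",
--     "4",
--     "5",
--     "6",
--     "7",
--     "8",
--     "9",
-- ]
--
-- def where_is_next_digit(start: int, s: str) -> (int, int):
--     """
--     Returns a int tupple that represent the index of the start and the end of the digit
--
--     Example: s = "eight" -> (0,4)
--              s = "2ec" -> (0,0)
--              s = "dqwdeight" -> (4, 8)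
--     """
--     if s == "":
--         return None
--     for n in digits:
--         if s.startswith(n):
--             return (start, start + len(n) - 1)
--     start += 1
--     return where_is_next_digit(start, s[1:])
-- ===== SOURCE B (Python) =====
-- digits = [
--     "one", "two", "three", "four", "five", "six", "seven", "eight", "nine",
--     "1", "2", "3", "4", "5", "6", "7", "8", "9",
-- ]
--
-- def where_is_next_digit(start: int, s: str) -> (int, int):
--     # Iterative left-to-right scan instead of recursion on the string tail.
--     for i in range(len(s)):
--         for n in digits:
--             if s.startswith(n, i):
--                 return (start + i, start + i + len(n) - 1)
--     return None
-- ===== Notes on version B (the rewrite author's own statement) =====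
-- stated objective: faster
-- what changed: Replaced A's tail recursion on the string suffix (which re-slices s[1:] and increments start each call) with a single iterative index scan using s.startswith(n, i), returning on the first match and None after the loop; no per-position string copies or call frames.
import Mathlib
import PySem

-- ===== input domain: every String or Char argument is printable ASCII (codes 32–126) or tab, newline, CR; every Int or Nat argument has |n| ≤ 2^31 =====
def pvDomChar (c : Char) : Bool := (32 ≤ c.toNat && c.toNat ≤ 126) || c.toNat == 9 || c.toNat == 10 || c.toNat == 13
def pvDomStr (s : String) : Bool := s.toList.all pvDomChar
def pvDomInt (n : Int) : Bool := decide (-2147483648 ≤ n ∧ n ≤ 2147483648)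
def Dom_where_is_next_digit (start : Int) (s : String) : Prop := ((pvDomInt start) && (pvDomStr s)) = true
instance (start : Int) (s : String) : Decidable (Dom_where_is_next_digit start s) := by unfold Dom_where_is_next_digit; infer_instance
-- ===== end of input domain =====

-- B replaces A's tail recursion on the string suffix by an iterative index scan; return value only, no side effects.

-- the module-level `digits` list, as lists of chars
def pvDigits : List (List Char) :=
  ["one".toList, "two".toList, "three".toList, "four".toList, "five".toList,
   "six".toList, "seven".toList, "eight".toList, "nine".toList,
   "1".toList, "2".toList, "3".toList, "4".toList, "5".toList,
   "6".toList, "7".toList, "8".toList, "9".toList]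

-- ===== PORT A =====
-- A: if s == "": return None; for n in digits: if s.startswith(n): return (start, start+len(n)-1);
--    recurse on (start+1, s[1:]).  `find?` is the first n with s.startswith(n).
def pvGoA (start : Int) (cs : List Char) : Option (Int × Int) :=
  match cs with
  | [] => none
  | _ :: rest =>
    match pvDigits.find? (fun n => n.isPrefixOf cs) with
    | some n => some (start, start + (n.length : Int) - 1)
    | none => pvGoA (start + 1) rest

def where_is_next_digit (start : Int) (s : String) : Option (Int × Int) :=
  pvGoA start s.toList

-- ===== PORT B =====
-- B: for i in range(len(s)): for n in digits: if s.startswith(n, i): return (start+i, start+i+len(n)-1); return None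
def where_is_next_digit_alt (start : Int) (s : String) : Option (Int × Int) :=
  let cs := s.toList
  (List.range cs.length).findSome? (fun (i : Nat) =>
    match pvDigits.find? (fun n => n.isPrefixOf (cs.drop i)) with
    | some n => some (start + (i : Int), start + (i : Int) + (n.length : Int) - 1)
    | none => none)

-- ===== PRECONDITION & SPEC =====
def Spec_where_is_next_digit (start : Int) (s : String) (out : Option (Int × Int)) : Prop := out = where_is_next_digit_alt start s
instance (start : Int) (s : String) (out : Option (Int × Int)) : Decidable (Spec_where_is_next_digit start s out) := by unfold Spec_where_is_next_digit; infer_instance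

-- ===== CLAIM (what is proved, stated in full; the proofs are below) =====
def Claim_equal_where_is_next_digit : Prop := ∀ (start : Int) (s : String), Dom_where_is_next_digit start s → Spec_where_is_next_digit start s (where_is_next_digit start s)

-- ===== LEMMAS AND PROOFS =====

lemma pvFindSome?_congr {α β : Type} (f g : α → Option β) (l : List α)
    (h : ∀ a ∈ l, f a = g a) : l.findSome? f = l.findSome? g := by
  induction l with
  | nil => rfl
  | cons x xs ih =>
    simp only [List.findSome?_cons, h x (List.mem_cons_self ..)]
    cases g x with
    | some b => rfl
    | none => exact ih (fun a ha => h a (List.mem_cons_of_mem _ ha))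

lemma pvGoA_eq_scan (cs : List Char) : ∀ (start : Int),
    pvGoA start cs =
      (List.range cs.length).findSome? (fun (i : Nat) =>
        match pvDigits.find? (fun n => n.isPrefixOf (cs.drop i)) with
        | some n => some (start + (i : Int), start + (i : Int) + (n.length : Int) - 1)
        | none => none) := by
  induction cs with
  | nil => intro start; simp [pvGoA]
  | cons c rest ih =>
    intro start
    rw [pvGoA]
    rw [List.length_cons, List.range_succ_eq_map, List.findSome?_cons]
    cases h : pvDigits.find? (fun n => n.isPrefixOf (c :: rest)) with
    | some n => simp [h]
    | none =>
      simp only [List.drop_zero, h]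
      rw [List.findSome?_map, ih (start + 1)]
      apply pvFindSome?_congr
      intro i _
      simp only [Function.comp_apply, List.drop_succ_cons]
      cases pvDigits.find? (fun n => n.isPrefixOf (rest.drop i)) with
      | some n => simp; omega
      | none => rfl

-- ===== VERDICT (by name: the statement is the Claim_ definition above) =====
theorem where_is_next_digit_spec : Claim_equal_where_is_next_digit := by
  intro start s _
  unfold Spec_where_is_next_digit where_is_next_digit where_is_next_digit_alt
  exact pvGoA_eq_scan s.toList start
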